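-- pv_equiv track=rewrite | github.com/edwingavis/Data-Cleaning-Tool | clean.py | consolidate_guesses
-- ===== SOURCE A (Python) =====
-- def consolidate_guesses(guesses):
--     '''
--     guesses is iterable of (str, str) guesses
--     this isn't awful in terms of complexity if half reasonable numbers
--     memory could be better
--     but again shouldn't be a huge issue at reasonable sizes
--     '''
--     rv = []
--     for g in guesses:
--         placed = False
--         for s in rv:
--             if g[0] in s or g[1] in s:
--                 s.add(g[0])
--                 s.add(g[1])
--                 placed = True
--         if not placed:
--             s = set()
--             s.add(g[0])
--             s.add(g[1])
--             rv.append(s)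
--     rv = [sorted(s) for s in rv]
--     return rv
-- ===== SOURCE B (Python) =====
-- def consolidate_guesses(guesses):
--     '''
--     guesses is iterable of (str, str) guesses
--     inverted index: element -> set of indices of sets containing it,
--     so matching sets are found directly instead of scanning all sets
--     '''
--     sets = []
--     index = {}
--     for g in guesses:
--         a, b = g[0], g[1]
--         ids = index.get(a, set()) | index.get(b, set())
--         if not ids:
--             ids = {len(sets)}
--             sets.append(set())
--         for i in ids:
--             sets[i].add(a)
--             sets[i].add(b)
--             index.setdefault(a, set()).add(i)
--             index.setdefault(b, set()).add(i)
--     return [sorted(s) for s in sets]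
-- ===== Notes on version B (the rewrite author's own statement) =====
-- stated objective: alternative
-- what changed: Replaces A's scan of every existing set per guess with an inverted index (element -> set of indices of sets containing it), so each guess touches only the sets that actually contain one of its two elements.
import Mathlib
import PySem

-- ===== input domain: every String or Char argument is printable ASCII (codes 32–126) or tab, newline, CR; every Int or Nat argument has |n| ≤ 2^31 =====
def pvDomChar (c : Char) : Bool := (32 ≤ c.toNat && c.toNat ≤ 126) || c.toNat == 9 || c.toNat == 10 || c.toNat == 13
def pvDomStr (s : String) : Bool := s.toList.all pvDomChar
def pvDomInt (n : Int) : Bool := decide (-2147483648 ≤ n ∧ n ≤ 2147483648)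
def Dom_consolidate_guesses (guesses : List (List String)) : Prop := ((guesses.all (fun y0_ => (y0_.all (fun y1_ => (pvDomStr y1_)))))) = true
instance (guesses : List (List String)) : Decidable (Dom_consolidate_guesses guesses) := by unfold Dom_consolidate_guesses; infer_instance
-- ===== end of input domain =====

-- B replaces A's per-guess scan of all sets with an inverted index element -> set indices (alternative algorithm; return value only).

-- ===== PORT A =====
-- s.add(g[0]); s.add(g[1])
def cgAdd2 (s : PySem.Set String) (a b : String) : PySem.Set String :=
  PySem.Set.add (PySem.Set.add s a) b

-- the body of A's outer `for g in guesses` loop: state is rv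
def cgStepA (rv : List (PySem.Set String)) (g : List String) : List (PySem.Set String) :=
  match PySem.List.pyGet? g 0, PySem.List.pyGet? g 1 with
  | some a, some b =>
    let st := rv.foldl (fun (acc : List (PySem.Set String) × Bool) s =>
      if PySem.Set.contains s a || PySem.Set.contains s b then (acc.1 ++ [cgAdd2 s a b], true)
      else (acc.1 ++ [s], acc.2)) ([], false)
    if st.2 then st.1 else st.1 ++ [cgAdd2 PySem.Set.empty a b]
  | _, _ => rv   -- g[0] / g[1] would raise IndexError; excluded by Pre_

def consolidate_guesses (guesses : List (List String)) : List (List String) :=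
  (guesses.foldl cgStepA []).map (fun s => PySem.List.sorted s (fun x => x) false)

-- ===== PORT B =====
-- the body of B's outer loop: state is (sets, index); the inner `for i in ids` loop
-- updates sets[i] and index[a], index[b] (order-independent: updates at distinct indices commute)
def cgStepB (st : List (PySem.Set String) × PySem.Dict String (PySem.Set Nat)) (g : List String) :
    List (PySem.Set String) × PySem.Dict String (PySem.Set Nat) :=
  match PySem.List.pyGet? g 0, PySem.List.pyGet? g 1 with
  | some a, some b =>
    let ids0 := PySem.Set.union (st.2.getD a PySem.Set.empty) (st.2.getD b PySem.Set.empty)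
    let p : PySem.Set Nat × List (PySem.Set String) :=
      if ids0.isEmpty then
        (PySem.Set.add PySem.Set.empty st.1.length, st.1 ++ [PySem.Set.empty])
      else (ids0, st.1)
    p.1.foldl (fun st2 i =>
      (st2.1.modify i (fun s => cgAdd2 s a b),
        let d1 := st2.2.insert a (PySem.Set.add (st2.2.getD a PySem.Set.empty) i);
        d1.insert b (PySem.Set.add (d1.getD b PySem.Set.empty) i))) (p.2, st.2)
  | _, _ => st   -- unreachable under Pre_

def consolidate_guesses_alt (guesses : List (List String)) : List (List String) :=
  ((guesses.foldl cgStepB ([], PySem.Dict.empty)).1).map (fun s => PySem.List.sorted s (fun x => x) false)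

-- ===== PRECONDITION & SPEC =====
-- Pre_ excludes guesses with an element of length < 2, on which A raises IndexError (g[0]/g[1]).
def Pre_consolidate_guesses (guesses : List (List String)) : Prop :=
  ∀ g ∈ guesses, 2 ≤ g.length
instance (guesses : List (List String)) : Decidable (Pre_consolidate_guesses guesses) := by
  unfold Pre_consolidate_guesses; infer_instance
def pvWitness_consolidate_guesses : List (List String) :=
  [["a", "b"], ["b", "c"], ["d", "e"]]

def Spec_consolidate_guesses (guesses : List (List String)) (out : List (List String)) : Prop := out = consolidate_guesses_alt guesses
instance (guesses : List (List String)) (out : List (List String)) : Decidable (Spec_consolidate_guesses guesses out) := by unfold Spec_consolidate_guesses; infer_instance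

-- ===== CLAIM (what is proved, stated in full; the proofs are below) =====
def Claim_equal_consolidate_guesses : Prop := ∀ (guesses : List (List String)), Dom_consolidate_guesses guesses → Pre_consolidate_guesses guesses → Spec_consolidate_guesses guesses (consolidate_guesses guesses)

-- ===== LEMMAS AND PROOFS =====

-- the invariant relating B's inverted index to the current list of sets
def cgIdxOk (rv : List (PySem.Set String)) (idx : PySem.Dict String (PySem.Set Nat)) : Prop :=
  (∀ e : String, (idx.getD e PySem.Set.empty).Nodup) ∧
  (∀ (e : String) (i : Nat), i ∈ idx.getD e PySem.Set.empty ↔ ∃ h : i < rv.length, e ∈ rv[i])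

theorem cgIdxOk_empty : cgIdxOk [] PySem.Dict.empty := by
  constructor
  · intro e; simp [PySem.Dict.getD_empty, PySem.Set.empty]
  · intro e i; simp [PySem.Dict.getD_empty, PySem.Set.empty]

theorem mem_cgAdd2 (s : PySem.Set String) (a b e : String) :
    e ∈ cgAdd2 s a b ↔ e ∈ s ∨ e = a ∨ e = b := by
  simp [cgAdd2, PySem.Set.mem_add, or_assoc]

-- A's inner loop, in closed form
theorem cgStepA_closed (rv : List (PySem.Set String)) (a b : String) (g : List String)
    (h0 : PySem.List.pyGet? g 0 = some a) (h1 : PySem.List.pyGet? g 1 = some b) :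
    cgStepA rv g =
      if rv.any (fun s => PySem.Set.contains s a || PySem.Set.contains s b) then
        rv.map (fun s => if PySem.Set.contains s a || PySem.Set.contains s b then cgAdd2 s a b else s)
      else rv ++ [cgAdd2 PySem.Set.empty a b] := by
  unfold cgStepA
  rw [h0, h1]
  dsimp only
  have hfun : (fun (acc : List (PySem.Set String) × Bool) s =>
      if PySem.Set.contains s a || PySem.Set.contains s b then (acc.1 ++ [cgAdd2 s a b], true)
      else (acc.1 ++ [s], acc.2)) =
      (fun (acc : List (PySem.Set String) × Bool) s =>
        ((fun (xs : List (PySem.Set String)) s =>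
            xs ++ [if PySem.Set.contains s a || PySem.Set.contains s b then cgAdd2 s a b else s]) acc.1 s,
         (fun (pl : Bool) s =>
            if (fun (s : PySem.Set String) => PySem.Set.contains s a || PySem.Set.contains s b) s = true then true else pl) acc.2 s)) := by
    funext acc s
    by_cases h : (PySem.Set.contains s a || PySem.Set.contains s b) = true
    · simp only [if_pos h]
    · simp only [if_neg h]
  rw [hfun, PySem.List.foldl_prod_mk
        (f := fun (xs : List (PySem.Set String)) s =>
          xs ++ [if PySem.Set.contains s a || PySem.Set.contains s b then cgAdd2 s a b else s])
        (g := fun (pl : Bool) (s : PySem.Set String) =>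
          if (fun (s : PySem.Set String) => PySem.Set.contains s a || PySem.Set.contains s b) s = true then true else pl),
      PySem.List.foldl_append_singleton_eq_map, PySem.List.foldl_if_true_eq]
  simp only [List.nil_append, Bool.false_or]
  by_cases hany : rv.any (fun s => PySem.Set.contains s a || PySem.Set.contains s b) = true
  · simp only [hany, if_true]
  · rw [Bool.not_eq_true] at hany
    simp only [hany, Bool.false_eq_true, if_false]
    congr 1
    conv_rhs => rw [← List.map_id rv]
    apply List.map_congr_left
    intro s hs
    have hcf : (PySem.Set.contains s a || PySem.Set.contains s b) = false := by
      rw [List.any_eq_false] at hany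
      simpa using hany s hs
    simp only [Bool.or_eq_false_iff] at hcf
    simp only [id]
    rw [if_neg]
    simp only [Bool.or_eq_true, not_or, Bool.not_eq_true]
    exact hcf
    -- earlier versions closed a ∉ s goals here

-- folding `modify` over a Nodup list of indices, elementwise
theorem foldl_modify_length {α : Type} (f : α → α) (l : List Nat) (xs : List α) :
    (l.foldl (fun acc i => acc.modify i f) xs).length = xs.length := by
  induction l generalizing xs with
  | nil => rfl
  | cons i t ih => simp [List.foldl_cons, ih, List.length_modify]

theorem foldl_modify_getElem {α : Type} (f : α → α) (l : List Nat) (hl : l.Nodup) (xs : List α)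
    (j : Nat) (hj : j < xs.length) (hj' : j < (l.foldl (fun acc i => acc.modify i f) xs).length) :
    (l.foldl (fun acc i => acc.modify i f) xs)[j] = if j ∈ l then f xs[j] else xs[j] := by
  induction l generalizing xs with
  | nil => simp
  | cons i t ih =>
    simp only [List.foldl_cons]
    rw [List.nodup_cons] at hl
    have hj2 : j < (xs.modify i f).length := by rw [List.length_modify]; exact hj
    rw [ih hl.2 (xs.modify i f) hj2 (by simpa [foldl_modify_length, List.length_modify] using hj')]
    rw [List.getElem_modify]
    by_cases hji : j ∈ t
    · have hne : i ≠ j := fun h => hl.1 (h ▸ hji)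
      simp [hji, hne, List.mem_cons]
    · by_cases hij : i = j
      · simp [hji, hij]
      · simp [hji, List.mem_cons, Ne.symm hij, hij]

-- the dict component of B's inner loop, membership after the fold
theorem cgDictStep_mem (a b : String) (i : Nat) (d : PySem.Dict String (PySem.Set Nat))
    (e : String) (j : Nat) :
    j ∈ ((let d1 := d.insert a (PySem.Set.add (d.getD a PySem.Set.empty) i);
          d1.insert b (PySem.Set.add (d1.getD b PySem.Set.empty) i)).getD e PySem.Set.empty) ↔
      j ∈ d.getD e PySem.Set.empty ∨ ((e = a ∨ e = b) ∧ j = i) := by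
  simp only []
  rw [PySem.Dict.getD_insert, PySem.Dict.getD_insert, PySem.Dict.getD_insert]
  by_cases heb : e = b
  · by_cases hba : b = a
    · subst heb; subst hba
      simp [PySem.Set.mem_add]
    · subst heb
      simp [hba, PySem.Set.mem_add]
  · by_cases hea : e = a
    · subst hea
      simp [heb, PySem.Set.mem_add]
    · simp [heb, hea]
theorem cgDictFold_mem (a b : String) (l : List Nat) (idx : PySem.Dict String (PySem.Set Nat))
    (e : String) (j : Nat) :
    j ∈ (l.foldl (fun d i =>
          let d1 := d.insert a (PySem.Set.add (d.getD a PySem.Set.empty) i);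
          d1.insert b (PySem.Set.add (d1.getD b PySem.Set.empty) i)) idx).getD e PySem.Set.empty ↔
      j ∈ idx.getD e PySem.Set.empty ∨ ((e = a ∨ e = b) ∧ j ∈ l) := by
  induction l generalizing idx with
  | nil => simp
  | cons i t ih =>
    simp only [List.foldl_cons]
    rw [ih]
    rw [cgDictStep_mem a b i idx e j]
    simp [List.mem_cons]
    tauto
theorem cgDictFold_nodup (a b : String) (l : List Nat) (idx : PySem.Dict String (PySem.Set Nat))
    (h : ∀ e : String, (idx.getD e PySem.Set.empty).Nodup) :
    ∀ e : String, ((l.foldl (fun d i =>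
          let d1 := d.insert a (PySem.Set.add (d.getD a PySem.Set.empty) i);
          d1.insert b (PySem.Set.add (d1.getD b PySem.Set.empty) i)) idx).getD e PySem.Set.empty).Nodup := by
  induction l generalizing idx with
  | nil => exact h
  | cons i t ih =>
    simp only [List.foldl_cons]
    apply ih
    intro e
    rw [PySem.Dict.getD_insert, PySem.Dict.getD_insert, PySem.Dict.getD_insert]
    by_cases heb : e = b
    · by_cases hba : b = a
      · subst heb; subst hba
        rw [if_pos rfl, if_pos rfl]
        exact PySem.Set.nodup_add _ _ (PySem.Set.nodup_add _ _ (h _))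
      · subst heb
        simp only [if_neg hba]
        exact PySem.Set.nodup_add _ _ (h _)
    · by_cases hea : e = a
      · subst hea
        simp only [if_neg heb]
        exact PySem.Set.nodup_add _ _ (h _)
      · simp only [if_neg heb, if_neg hea]
        exact h _

-- appending then modifying the fresh last slot
theorem modify_append_singleton {α : Type} (f : α → α) (xs : List α) (x : α) :
    (xs ++ [x]).modify xs.length f = xs ++ [f x] := by
  induction xs with
  | nil => rfl
  | cons y t ih => simp only [List.cons_append, List.length_cons, List.modify_succ_cons, ih]

-- one outer step: B's state component equals A's, and the invariant is preserved
theorem cgStep_eq (g : List String) (hg : 2 ≤ g.length)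
    (rv : List (PySem.Set String)) (idx : PySem.Dict String (PySem.Set Nat))
    (hinv : cgIdxOk rv idx) :
    (cgStepB (rv, idx) g).1 = cgStepA rv g ∧ cgIdxOk (cgStepA rv g) (cgStepB (rv, idx) g).2 := by
  match g, hg with
  | a :: b :: r, _ =>
  have h0 : PySem.List.pyGet? (a :: b :: r) 0 = some a := by
    rw [show (0:Int) = ((0:Nat):Int) by norm_num, PySem.List.pyGet?_natCast]; rfl
  have h1 : PySem.List.pyGet? (a :: b :: r) 1 = some b := by
    rw [show (1:Int) = ((1:Nat):Int) by norm_num, PySem.List.pyGet?_natCast]; rfl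
  rw [cgStepA_closed rv a b _ h0 h1]
  unfold cgStepB
  rw [h0, h1]
  dsimp only
  set ids0 := PySem.Set.union (idx.getD a PySem.Set.empty) (idx.getD b PySem.Set.empty) with hids0
  have hmem : ∀ i : Nat, i ∈ ids0 ↔ ∃ h : i < rv.length, a ∈ rv[i] ∨ b ∈ rv[i] := by
    intro i
    rw [hids0, PySem.Set.mem_union, hinv.2 a i, hinv.2 b i]
    constructor
    · rintro (⟨h, hm⟩ | ⟨h, hm⟩) <;> exact ⟨h, by tauto⟩
    · rintro ⟨h, hm | hm⟩
      · exact Or.inl ⟨h, hm⟩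
      · exact Or.inr ⟨h, hm⟩
  have hnd : ids0.Nodup := PySem.Set.nodup_union _ _ (hinv.1 a)
  have hcond_iff : ∀ (i : Nat) (h : i < rv.length),
      (PySem.Set.contains rv[i] a || PySem.Set.contains rv[i] b) = true ↔ (a ∈ rv[i] ∨ b ∈ rv[i]) := by
    intro i h; simp [Bool.or_eq_true]
  have hany_iff : (rv.any fun s => PySem.Set.contains s a || PySem.Set.contains s b) = true ↔
      ∃ i, i ∈ ids0 := by
    rw [List.any_eq_true]
    constructor
    · rintro ⟨s, hs, hc⟩
      obtain ⟨i, h, rfl⟩ := List.mem_iff_getElem.mp hs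
      exact ⟨i, (hmem i).mpr ⟨h, (hcond_iff i h).mp hc⟩⟩
    · rintro ⟨i, hi⟩
      obtain ⟨h, hm⟩ := (hmem i).mp hi
      exact ⟨rv[i], List.getElem_mem h, (hcond_iff i h).mpr hm⟩
  by_cases hemp : ids0.isEmpty = true
  · -- no existing set contains a or b: a fresh set is appended
    have hids_nil : ids0 = [] := List.isEmpty_iff.mp hemp
    have hany : (rv.any fun s => PySem.Set.contains s a || PySem.Set.contains s b) = false := by
      rw [Bool.eq_false_iff]
      intro h
      obtain ⟨i, hi⟩ := hany_iff.mp h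
      rw [hids_nil] at hi
      exact List.not_mem_nil hi
    rw [if_pos hemp, hany]
    simp only [Bool.false_eq_true, if_false]
    have hadd : PySem.Set.add PySem.Set.empty rv.length = [rv.length] := rfl
    rw [hadd]
    rw [PySem.List.foldl_prod_mk
          (f := fun (xs : List (PySem.Set String)) i => xs.modify i (fun s => cgAdd2 s a b))
          (g := fun (d : PySem.Dict String (PySem.Set Nat)) i =>
            let d1 := d.insert a (PySem.Set.add (d.getD a PySem.Set.empty) i);
            d1.insert b (PySem.Set.add (d1.getD b PySem.Set.empty) i))]
    refine ⟨?_, ?_, ?_⟩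
    · simp only [List.foldl_cons, List.foldl_nil]
      exact modify_append_singleton _ rv _
    · exact cgDictFold_nodup a b [rv.length] idx hinv.1
    · intro e i
      rw [cgDictFold_mem a b [rv.length] idx e i]
      simp only [List.mem_singleton]
      constructor
      · rintro (hi | ⟨hab, rfl⟩)
        · obtain ⟨h, hm⟩ := (hinv.2 e i).mp hi
          exact ⟨by simp; omega, by rw [List.getElem_append_left h]; exact hm⟩
        · refine ⟨by simp, ?_⟩
          rw [List.getElem_append_right (by omega)]
          simp only [Nat.sub_self, List.getElem_singleton]
          rw [mem_cgAdd2]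
          simp [PySem.Set.empty]
          tauto
      · rintro ⟨h, hm⟩
        simp only [List.length_append, List.length_singleton] at h
        by_cases hlt : i < rv.length
        · rw [List.getElem_append_left hlt] at hm
          exact Or.inl ((hinv.2 e i).mpr ⟨hlt, hm⟩)
        · have hieq : i = rv.length := by omega
          subst hieq
          rw [List.getElem_append_right (by omega)] at hm
          simp only [Nat.sub_self, List.getElem_singleton] at hm
          rw [mem_cgAdd2] at hm
          simp [PySem.Set.empty] at hm
          exact Or.inr ⟨by tauto, rfl⟩
  · -- some sets already contain a or b: exactly those (the indices in ids0) are updated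
    have hne : ids0 ≠ [] := fun h => hemp (by rw [h]; rfl)
    have hany : (rv.any fun s => PySem.Set.contains s a || PySem.Set.contains s b) = true := by
      obtain ⟨i, hi⟩ := List.exists_mem_of_ne_nil ids0 hne
      exact hany_iff.mpr ⟨i, hi⟩
    rw [if_neg hemp, hany, if_pos rfl]
    rw [PySem.List.foldl_prod_mk
          (f := fun (xs : List (PySem.Set String)) i => xs.modify i (fun s => cgAdd2 s a b))
          (g := fun (d : PySem.Dict String (PySem.Set Nat)) i =>
            let d1 := d.insert a (PySem.Set.add (d.getD a PySem.Set.empty) i);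
            d1.insert b (PySem.Set.add (d1.getD b PySem.Set.empty) i))]
    have hsets : ids0.foldl (fun acc i => acc.modify i (fun s => cgAdd2 s a b)) rv =
        rv.map (fun s => if PySem.Set.contains s a || PySem.Set.contains s b then cgAdd2 s a b else s) := by
      apply List.ext_getElem
      · rw [foldl_modify_length, List.length_map]
      · intro j hj hj2
        rw [foldl_modify_getElem _ ids0 hnd rv j (by rwa [foldl_modify_length] at hj) hj,
            List.getElem_map]
        have hjl : j < rv.length := by rwa [foldl_modify_length] at hj
        by_cases hjm : j ∈ ids0
        · obtain ⟨h, hm⟩ := (hmem j).mp hjm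
          rw [if_pos hjm, if_pos ((hcond_iff j hjl).mpr hm)]
        · rw [if_neg hjm, if_neg ?hc]
          intro hc
          exact hjm ((hmem j).mpr ⟨hjl, (hcond_iff j hjl).mp hc⟩)
    refine ⟨hsets, ?_, ?_⟩
    · exact cgDictFold_nodup a b ids0 idx hinv.1
    · intro e i
      rw [cgDictFold_mem a b ids0 idx e i]
      constructor
      · rintro (hi | ⟨hab, hi⟩)
        · obtain ⟨h, hm⟩ := (hinv.2 e i).mp hi
          refine ⟨by simpa using h, ?_⟩
          rw [List.getElem_map]
          by_cases hc : (PySem.Set.contains rv[i] a || PySem.Set.contains rv[i] b) = true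
          · rw [if_pos hc, mem_cgAdd2]; tauto
          · rw [if_neg hc]; exact hm
        · obtain ⟨h, hm⟩ := (hmem i).mp hi
          refine ⟨by simpa using h, ?_⟩
          rw [List.getElem_map, if_pos ((hcond_iff i h).mpr hm), mem_cgAdd2]
          tauto
      · rintro ⟨h, hm⟩
        have hil : i < rv.length := by simpa using h
        rw [List.getElem_map] at hm
        by_cases hc : (PySem.Set.contains rv[i] a || PySem.Set.contains rv[i] b) = true
        · rw [if_pos hc, mem_cgAdd2] at hm
          rcases hm with hm | hm
          · exact Or.inl ((hinv.2 e i).mpr ⟨hil, hm⟩)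
          · exact Or.inr ⟨hm, (hmem i).mpr ⟨hil, (hcond_iff i hil).mp hc⟩⟩
        · rw [if_neg hc] at hm
          exact Or.inl ((hinv.2 e i).mpr ⟨hil, hm⟩)

theorem cgFold_eq (guesses : List (List String)) (hg : ∀ g ∈ guesses, 2 ≤ g.length)
    (rv : List (PySem.Set String)) (idx : PySem.Dict String (PySem.Set Nat))
    (hinv : cgIdxOk rv idx) :
    (guesses.foldl cgStepB (rv, idx)).1 = guesses.foldl cgStepA rv := by
  induction guesses generalizing rv idx with
  | nil => rfl
  | cons g t ih =>
    have h := cgStep_eq g (hg g (by simp)) rv idx hinv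
    simp only [List.foldl_cons]
    have : cgStepB (rv, idx) g = ((cgStepB (rv, idx) g).1, (cgStepB (rv, idx) g).2) := rfl
    rw [this, h.1]
    exact ih (fun g hgm => hg g (by simp [hgm])) _ _ h.2

-- ===== VERDICT (by name: the statement is the Claim_ definition above) =====
theorem consolidate_guesses_spec : Claim_equal_consolidate_guesses := by
  intro guesses _ hpre
  unfold Spec_consolidate_guesses consolidate_guesses consolidate_guesses_alt
  rw [cgFold_eq guesses hpre [] PySem.Dict.empty cgIdxOk_empty]
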